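-- pv_equiv track=rewrite | github.com/chrisyang922/CS | CASCS111/Week4/ps3pr4.py | find
-- ===== SOURCE A (Python) =====
-- def find(elem, seq):
--     """ returns the index of first occurence of elem(parameter variable)
--     in seq(parameter variable) or -1 if there is no occurence of elem
--     input elem: If the type of seq is string, elem should be a character
--     and if the type of seq is list, elem can be any value
--     input seq: Any list or string of characters
--     """
--     if len(seq) == 0:
--         return -1
--     elif elem == seq[0]:
--         return 0
--     else:
--         rest_seq = find(elem, seq[1:])
--         if rest_seq >= 0:
--             return rest_seq + 1
--         else:
--             return rest_seq
-- ===== SOURCE B (Python) =====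
-- def find(elem, seq):
--     i = 0
--     for x in seq:
--         if x == elem:
--             return i
--         i += 1
--     return -1
-- ===== Notes on version B (the rewrite author's own statement) =====
-- stated objective: simpler
-- what changed: Replaces A's recursion over seq[1:] with per-frame +1 adjustment by a single flat forward scan maintaining an index counter.
import Mathlib
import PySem

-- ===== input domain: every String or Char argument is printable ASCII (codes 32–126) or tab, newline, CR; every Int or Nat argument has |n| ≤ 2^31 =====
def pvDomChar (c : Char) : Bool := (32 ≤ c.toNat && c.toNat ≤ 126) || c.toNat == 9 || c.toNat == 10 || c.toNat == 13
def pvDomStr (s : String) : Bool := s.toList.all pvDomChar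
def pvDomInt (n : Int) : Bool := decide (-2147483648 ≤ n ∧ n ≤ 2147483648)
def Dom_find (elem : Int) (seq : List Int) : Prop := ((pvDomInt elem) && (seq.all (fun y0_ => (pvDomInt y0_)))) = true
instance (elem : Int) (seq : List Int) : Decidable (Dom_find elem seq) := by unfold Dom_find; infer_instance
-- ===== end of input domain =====

-- B replaces A's recursion over seq[1:] (result adjusted by +1 per frame) with a flat
-- forward scan carrying an index counter; objective: simpler (a single pass, no copies).

-- ===== PORT A =====
-- recursion on the list: empty → -1, head match → 0, else recurse on the tail and add 1 iff ≥ 0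
def find (elem : Int) (seq : List Int) : Int :=
  match seq with
  | [] => -1
  | x :: rest =>
    if elem = x then 0
    else
      let rest_seq := find elem rest
      if rest_seq ≥ 0 then rest_seq + 1 else rest_seq

-- ===== PORT B =====
-- iterative scan with an index counter i
def findAltLoop (elem : Int) (seq : List Int) (i : Int) : Int :=
  match seq with
  | [] => -1
  | x :: rest => if x = elem then i else findAltLoop elem rest (i + 1)

def find_alt (elem : Int) (seq : List Int) : Int :=
  findAltLoop elem seq 0

-- ===== PRECONDITION & SPEC =====
def Spec_find (elem : Int) (seq : List Int) (out : Int) : Prop := out = find_alt elem seq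
instance (elem : Int) (seq : List Int) (out : Int) : Decidable (Spec_find elem seq out) := by unfold Spec_find; infer_instance

-- ===== CLAIM (what is proved, stated in full; the proofs are below) =====
def Claim_equal_find : Prop := ∀ (elem : Int) (seq : List Int), Dom_find elem seq → Spec_find elem seq (find elem seq)

-- ===== LEMMAS AND PROOFS =====

theorem find_nonneg_or_neg1 (elem : Int) (seq : List Int) :
    find elem seq = -1 ∨ find elem seq ≥ 0 := by
  induction seq with
  | nil => left; rfl
  | cons x rest ih =>
    by_cases h : elem = x
    · right; simp [find, h]
    · rcases ih with h1 | h1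
      · left; simp [find, h, h1]
      · right; simp [find, h, h1]; omega

theorem findAltLoop_char (elem : Int) (seq : List Int) (i : Int) :
    findAltLoop elem seq i =
      if find elem seq ≥ 0 then find elem seq + i else -1 := by
  induction seq generalizing i with
  | nil => simp [findAltLoop, find]
  | cons x rest ih =>
    by_cases h : x = elem
    · simp [findAltLoop, find, h]
    · have h' : ¬ elem = x := fun e => h e.symm
      simp only [findAltLoop, if_neg h, ih (i + 1)]
      rcases find_nonneg_or_neg1 elem rest with h1 | h1
      · simp [find, h', h1]
      · simp only [find, if_neg h', if_pos (by omega : find elem rest ≥ 0)]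
        rw [if_pos (by omega : find elem rest + 1 ≥ 0)]
        ring

theorem find_eq_alt (elem : Int) (seq : List Int) : find elem seq = find_alt elem seq := by
  unfold find_alt
  rw [findAltLoop_char]
  rcases find_nonneg_or_neg1 elem seq with h | h <;> simp [h]

-- ===== VERDICT (by name: the statement is the Claim_ definition above) =====
theorem find_spec : Claim_equal_find := by
  intro elem seq _
  unfold Spec_find
  exact find_eq_alt elem seq
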